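-- pv_equiv track=rewrite | github.com/18259985989/CH_Crawler | CH_DB/dataBaseOperation.py | makePlaceholder
-- ===== SOURCE A (Python) =====
-- def makePlaceholder(data):
--     placeholder = ""
--     length = len(data)
--     for i in range(0,length):
--         if i == length - 1:
--             placeholder = placeholder + "%s"
--         else:
--             placeholder = placeholder + "%s" + ","
--     return placeholder
-- ===== SOURCE B (Python) =====
-- def makePlaceholder(data):
--     return ",".join(["%s"] * len(data))
-- ===== Notes on version B (the rewrite author's own statement) =====
-- stated objective: faster
-- what changed: Replaces the index loop with its last-element branch by a single join over a repeated placeholder list.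
import Mathlib
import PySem

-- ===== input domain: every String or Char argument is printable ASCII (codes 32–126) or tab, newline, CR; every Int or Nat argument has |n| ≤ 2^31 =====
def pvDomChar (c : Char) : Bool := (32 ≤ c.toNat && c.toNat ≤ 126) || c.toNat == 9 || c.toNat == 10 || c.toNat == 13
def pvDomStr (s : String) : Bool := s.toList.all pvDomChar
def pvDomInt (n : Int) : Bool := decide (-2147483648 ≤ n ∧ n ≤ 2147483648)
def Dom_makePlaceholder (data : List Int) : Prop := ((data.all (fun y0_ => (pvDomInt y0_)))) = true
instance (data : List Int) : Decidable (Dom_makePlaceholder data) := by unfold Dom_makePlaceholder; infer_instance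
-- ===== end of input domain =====

-- B replaces A's index loop with its last-element branch by a single join over a repeated
-- placeholder list ("," .join(["%s"] * len(data))); same return value on every input.

-- ===== PORT A =====
-- for i in range(0, length): placeholder += "%s" [+ ","]  (literal transliteration)
def makePlaceholder (data : List Int) : String :=
  (PySem.List.pyRange 0 (data.length : Int) 1).foldl
    (fun placeholder i =>
      if i == (data.length : Int) - 1 then placeholder ++ "%s" else placeholder ++ "%s" ++ ",")
    ""

-- ===== PORT B =====
-- return ",".join(["%s"] * len(data))
def makePlaceholder_alt (data : List Int) : String :=
  PySem.Str.join "," (PySem.List.pyRepeat ["%s"] (data.length : Int))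

-- ===== PRECONDITION & SPEC =====
def Spec_makePlaceholder (data : List Int) (out : String) : Prop := out = makePlaceholder_alt data
instance (data : List Int) (out : String) : Decidable (Spec_makePlaceholder data out) := by unfold Spec_makePlaceholder; infer_instance

-- ===== CLAIM (what is proved, stated in full; the proofs are below) =====
def Claim_equal_makePlaceholder : Prop := ∀ (data : List Int), Dom_makePlaceholder data → Spec_makePlaceholder data (makePlaceholder data)

-- ===== LEMMAS AND PROOFS =====

-- the characters contributed by n non-final loop iterations of A
def pvRep (n : Nat) : List Char := (List.replicate n ['%', 's', ',']).flatten

theorem pvRep_succ (n : Nat) : pvRep (n + 1) = '%' :: 's' :: ',' :: pvRep n := by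
  simp [pvRep, List.replicate_succ]

theorem pvRep_succ' (n : Nat) : pvRep (n + 1) = pvRep n ++ ['%', 's', ','] := by
  simp [pvRep, List.replicate_succ']

-- A's loop over range(0, n) with all branches non-final (n ≤ length - 1)
theorem foldA_else (L : Int) (n : Nat) (init : String) (h : (n : Int) ≤ L - 1) :
    ((PySem.List.pyRange 0 (n : Int) 1).foldl
      (fun placeholder i =>
        if i == L - 1 then placeholder ++ "%s" else placeholder ++ "%s" ++ ",") init).toList
      = init.toList ++ pvRep n := by
  induction n generalizing init with
  | zero => simp [PySem.List.pyRange_one_eq_nil, pvRep]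
  | succ m ih =>
      have hcast : ((m : Int) + 1) = ((m + 1 : Nat) : Int) := by push_cast; ring
      have hsplit : PySem.List.pyRange 0 ((m + 1 : Nat) : Int) 1
          = PySem.List.pyRange 0 (m : Int) 1 ++ [(m : Int)] := by
        rw [← hcast]
        exact PySem.List.pyRange_one_succ_right (by positivity)
      have hne : ((m : Int) == L - 1) = false := by
        simp only [beq_eq_false_iff_ne]; omega
      rw [hsplit, List.foldl_append]
      simp only [List.foldl, hne, Bool.false_eq_true, if_false]
      rw [String.toList_append, String.toList_append,
        ih init (by omega), pvRep_succ']
      simp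

-- B's join of n+1 copies of "%s"
theorem joinB (n : Nat) :
    PySem.Chars.join [','] (List.replicate (n + 1) ['%', 's']) = pvRep n ++ ['%', 's'] := by
  induction n with
  | zero => simp [PySem.Chars.join_singleton, pvRep]
  | succ m ih =>
      rw [List.replicate_succ, List.replicate_succ,
        PySem.Chars.join_cons_cons, ← List.replicate_succ, ih, pvRep_succ]
      simp

-- ===== VERDICT (by name: the statement is the Claim_ definition above) =====
theorem makePlaceholder_spec : Claim_equal_makePlaceholder := by
  intro data _
  unfold Spec_makePlaceholder makePlaceholder makePlaceholder_alt
  rw [String.ext_iff, PySem.Str.toList_join, PySem.List.pyRepeat_singleton]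
  cases hd : data.length with
  | zero => simp [PySem.List.pyRange_one_eq_nil, PySem.Chars.join_nil]
  | succ n =>
      have hsplit : PySem.List.pyRange 0 ((n : Int) + 1) 1
          = PySem.List.pyRange 0 (n : Int) 1 ++ [(n : Int)] :=
        PySem.List.pyRange_one_succ_right (by positivity)
      have heq : ((n : Int) == (n : Int) + 1 - 1) = true := by simp
      simp only [Int.toNat_natCast]
      push_cast
      rw [hsplit, List.foldl_append]
      simp only [List.foldl, heq, if_true]
      rw [String.toList_append, foldA_else ((n : Int) + 1) n "" (by omega)]
      rw [List.map_replicate, show "%s".toList = ['%', 's'] from by decide, joinB]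
      rfl
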